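-- pv_equiv track=rewrite | github.com/hj59172507/AlgorithmPractice | LeetCodePractice/DataStructure/Sorted/MinSetSize.py | minSetSize
-- ===== SOURCE A (Python) =====
-- import collections
-- from typing import List
--
-- def minSetSize(arr: List[int]) -> int:
--     count = collections.defaultdict(int)
--     for i, num in enumerate(arr):
--         count[num] += 1
--     res, c = 0, 0
--     for i in sorted(count.items(), key=lambda kv: kv[1], reverse=1):
--         res += 1
--         c += i[1]
--         if c >= (len(arr) + 1)//2:
--             break
--     return res
--
-- arr = [1, 2, 3, 4, 4, 5, 6, 7, 8, 9, 10]
-- ===== SOURCE B (Python) =====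
-- def minSetSize(arr):
--     # bucket (counting sort) on frequencies instead of a comparison sort
--     n = len(arr)
--     freq = {}
--     for x in arr:
--         freq[x] = freq.get(x, 0) + 1
--     bucket = {}
--     for f in freq.values():
--         bucket[f] = bucket.get(f, 0) + 1
--     desc = []
--     for f in range(n, 0, -1):
--         desc += [f] * bucket.get(f, 0)
--     need = (n + 1) // 2
--     removed = sets = 0
--     for f in desc:
--         sets += 1
--         removed += f
--         if removed >= need:
--             break
--     return sets
-- ===== Notes on version B (the rewrite author's own statement) =====
-- stated objective: alternative
-- what changed: Replaces the comparison sort of (value,count) items by a counting-sort bucket over frequencies iterated from high to low; asymptotically O(n) but not measurably faster in CPython, where sorted() runs in C.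
import Mathlib
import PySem

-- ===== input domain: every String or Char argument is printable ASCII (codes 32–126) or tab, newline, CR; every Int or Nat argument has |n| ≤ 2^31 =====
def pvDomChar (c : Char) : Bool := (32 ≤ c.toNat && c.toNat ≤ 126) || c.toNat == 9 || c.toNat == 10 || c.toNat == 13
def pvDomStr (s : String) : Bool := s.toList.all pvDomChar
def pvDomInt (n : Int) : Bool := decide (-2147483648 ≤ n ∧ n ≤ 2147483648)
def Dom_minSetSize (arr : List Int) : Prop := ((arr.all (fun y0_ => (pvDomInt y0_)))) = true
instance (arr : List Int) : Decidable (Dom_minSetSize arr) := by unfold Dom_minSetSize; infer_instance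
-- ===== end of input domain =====

-- B replaces A's comparison sort of (value,count) items by a counting-sort bucket over
-- frequencies iterated high-to-low (objective: alternative algorithm, same measured cost).

-- ===== PORT A =====
-- the 'for i in sorted(...)' loop with its break
def goBreakA (half : Int) : List (Int × Int) → Int → Int → Int
  | [], res, _ => res
  | kv :: t, res, c =>
      let res' := res + 1
      let c' := c + kv.2
      if c' ≥ half then res' else goBreakA half t res' c'

def minSetSize (arr : List Int) : Int :=
  let count := (PySem.List.enumerate arr).foldl
      (fun d p => d.modify p.2 0 (· + 1)) (PySem.Dict.empty : PySem.Dict Int Int)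
  goBreakA (PySem.Int.floordiv ((arr.length : Int) + 1) 2)
    (PySem.List.sorted count.items (fun kv => kv.2) true) 0 0

-- ===== PORT B =====
-- the 'for f in desc' loop with its break
def goBreakB (need : Int) : List Int → Int → Int → Int
  | [], sets, _ => sets
  | f :: t, sets, removed =>
      let sets' := sets + 1
      let removed' := removed + f
      if removed' ≥ need then sets' else goBreakB need t sets' removed'

def minSetSize_alt (arr : List Int) : Int :=
  let n : Int := (arr.length : Int)
  let freq := arr.foldl (fun d x => d.insert x (d.getD x 0 + 1))
      (PySem.Dict.empty : PySem.Dict Int Int)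
  let bucket := freq.values.foldl (fun d f => d.insert f (d.getD f 0 + 1))
      (PySem.Dict.empty : PySem.Dict Int Int)
  let desc := (PySem.List.pyRange n 0 (-1)).foldl
      (fun acc f => acc ++ PySem.List.pyRepeat [f] (bucket.getD f 0)) ([] : List Int)
  goBreakB (PySem.Int.floordiv (n + 1) 2) desc 0 0

-- ===== PRECONDITION & SPEC =====
def Spec_minSetSize (arr : List Int) (out : Int) : Prop := out = minSetSize_alt arr
instance (arr : List Int) (out : Int) : Decidable (Spec_minSetSize arr out) := by unfold Spec_minSetSize; infer_instance

-- ===== CLAIM (what is proved, stated in full; the proofs are below) =====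
def Claim_equal_minSetSize : Prop := ∀ (arr : List Int), Dom_minSetSize arr → Spec_minSetSize arr (minSetSize arr)

-- ===== LEMMAS AND PROOFS =====

-- A's pair loop only ever reads the count component
theorem goBreakA_eq_goBreakB (half : Int) (l : List (Int × Int)) (res c : Int) :
    goBreakA half l res c = goBreakB half (l.map (·.2)) res c := by
  induction l generalizing res c with
  | nil => rfl
  | cons kv t ih =>
      simp only [goBreakA, goBreakB, List.map_cons]
      split_ifs <;> simp [ih]

-- a strictly-decreasing list of count blocks is Pairwise (· ≥ ·)
theorem pairwise_ge_flatMap_replicate (l : List Int) (k : Int → Nat)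
    (hl : l.Pairwise (· > ·)) :
    (l.flatMap (fun f => List.replicate (k f) f)).Pairwise (· ≥ ·) := by
  induction l with
  | nil => simp
  | cons f t ih =>
      simp only [List.flatMap_cons, List.pairwise_append]
      refine ⟨?_, ih hl.of_cons, ?_⟩
      · exact List.pairwise_replicate.mpr (Or.inr le_rfl)
      · intro a ha b hb
        obtain ⟨g, hg, hbg⟩ := List.mem_flatMap.mp hb
        have : a = f := List.eq_of_mem_replicate ha
        have : b = g := List.eq_of_mem_replicate hbg
        subst_vars
        exact le_of_lt (List.rel_of_pairwise_cons hl hg)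

-- counting-sort blocks are a permutation of the counted list
theorem count_flatMap_replicate (l : List Int) (xs : List Int) (hnd : l.Nodup) (a : Int) :
    (l.flatMap (fun f => List.replicate (xs.count f) f)).count a
      = if a ∈ l then xs.count a else 0 := by
  induction l with
  | nil => simp
  | cons f t ih =>
      have hf : f ∉ t := (List.nodup_cons.mp hnd).1
      have ih' := ih (List.nodup_cons.mp hnd).2
      simp only [List.flatMap_cons, List.count_append, List.count_replicate, List.mem_cons, ih']
      by_cases haf : a = f
      · subst haf; simp [hf]
      · simp [haf, Ne.symm haf]

theorem perm_flatMap_replicate (l : List Int) (xs : List Int) (hnd : l.Nodup)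
    (hcov : ∀ c ∈ xs, c ∈ l) :
    (l.flatMap (fun f => List.replicate (xs.count f) f)).Perm xs := by
  rw [List.perm_iff_count]
  intro a
  rw [count_flatMap_replicate l xs hnd a]
  by_cases h : a ∈ l
  · simp [h]
  · have : a ∉ xs := fun hx => h (hcov a hx)
    simp [h, List.count_eq_zero_of_not_mem this]

-- two Pairwise-(≥) permutations of the same multiset are equal
theorem eq_of_perm_of_pairwise_ge (l₁ l₂ : List Int) (hp : l₁.Perm l₂)
    (h₁ : l₁.Pairwise (· ≥ ·)) (h₂ : l₂.Pairwise (· ≥ ·)) : l₁ = l₂ := by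
  exact hp.eq_of_pairwise (fun a b _ _ h h' => le_antisymm h' h) h₁ h₂

theorem descRange_pairwise_gt (n : Int) :
    (PySem.List.pyRange n 0 (-1)).Pairwise (· > ·) := by
  rw [PySem.List.pyRange_neg_one]
  exact (List.pairwise_lt_range).map _ (fun {a b} h => by omega)

-- the central list identity: A's sorted count list = B's bucket expansion
theorem sorted_counts_eq_desc (arr : List Int) :
    ((PySem.List.sorted (PySem.Dict.counter arr : PySem.Dict Int Int).items
        (fun kv => kv.2) true).map (·.2))
      = (PySem.List.pyRange (arr.length : Int) 0 (-1)).flatMap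
          (fun f => List.replicate ((PySem.Dict.counter arr : PySem.Dict Int Int).values.count f) f) := by
  set vals := (PySem.Dict.counter arr : PySem.Dict Int Int).values with hvals
  have hvals_mem : ∀ v ∈ vals, 1 ≤ v ∧ v ≤ (arr.length : Int) := by
    intro v hv
    rw [hvals, PySem.Dict.values, PySem.Dict.items_counter, List.map_map] at hv
    obtain ⟨k, hk, rfl⟩ := List.mem_map.mp hv
    have hkm : k ∈ arr := (PySem.Set.mem_ofList _ _).mp hk
    have h1 : 0 < arr.count k := List.count_pos_iff.mpr hkm
    have h2 : arr.count k ≤ arr.length := List.count_le_length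
    constructor <;> simp <;> omega
  have hrange : (PySem.List.pyRange (arr.length : Int) 0 (-1)).Pairwise (· > ·) :=
    descRange_pairwise_gt _
  have hnd : (PySem.List.pyRange (arr.length : Int) 0 (-1)).Nodup :=
    hrange.imp (fun h => ne_of_gt h)
  have hcov : ∀ c ∈ vals, c ∈ PySem.List.pyRange (arr.length : Int) 0 (-1) := by
    intro c hc
    have := hvals_mem c hc
    rw [PySem.List.mem_pyRange_neg_one]
    omega
  have hperm_r : ((PySem.List.pyRange (arr.length : Int) 0 (-1)).flatMap
      (fun f => List.replicate (vals.count f) f)).Perm vals :=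
    perm_flatMap_replicate _ _ hnd hcov
  have hpw_r := pairwise_ge_flatMap_replicate _ (fun f => vals.count f) hrange
  have hperm_l : ((PySem.List.sorted (PySem.Dict.counter arr : PySem.Dict Int Int).items
      (fun kv => kv.2) true).map (·.2)).Perm vals := by
    rw [hvals, PySem.Dict.values]
    exact (PySem.List.sorted_perm _ _ _).map _
  have hpw_l : ((PySem.List.sorted (PySem.Dict.counter arr : PySem.Dict Int Int).items
      (fun kv => kv.2) true).map (·.2)).Pairwise (· ≥ ·) := by
    have := PySem.List.sorted_pairwise_rev
      (xs := (PySem.Dict.counter arr : PySem.Dict Int Int).items) (key := fun kv => kv.2)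
    exact this.map _ (fun {a b} h => h)
  exact eq_of_perm_of_pairwise_ge _ _ (hperm_l.trans hperm_r.symm) hpw_l hpw_r

-- ===== VERDICT (by name: the statement is the Claim_ definition above) =====
theorem minSetSize_spec : Claim_equal_minSetSize := by
  intro arr _
  show minSetSize arr = minSetSize_alt arr
  unfold minSetSize minSetSize_alt
  -- both dicts are Counter(arr)
  have hA : (PySem.List.enumerate arr).foldl
      (fun d p => d.modify p.2 0 (· + 1)) (PySem.Dict.empty : PySem.Dict Int Int)
      = PySem.Dict.counter arr := by
    have := (List.foldl_map (f := fun p : Int × Int => p.2)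
      (g := fun d x => PySem.Dict.modify d x 0 (· + 1))
      (l := PySem.List.enumerate arr)
      (init := (PySem.Dict.empty : PySem.Dict Int Int)))
    rw [PySem.List.map_snd_enumerate] at this
    rw [← this, PySem.Dict.counter_eq_foldl]
  have hB : arr.foldl (fun d x => d.insert x (d.getD x 0 + 1))
      (PySem.Dict.empty : PySem.Dict Int Int) = PySem.Dict.counter arr :=
    PySem.Dict.foldl_insert_getD_add_one_eq_counter arr
  rw [hA, hB]
  have hbucket : ∀ f : Int,
      (((PySem.Dict.counter arr : PySem.Dict Int Int).values.foldl
        (fun d f => d.insert f (d.getD f 0 + 1))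
        (PySem.Dict.empty : PySem.Dict Int Int)).getD f 0)
        = ((PySem.Dict.counter arr : PySem.Dict Int Int).values.count f : Int) := by
    intro f
    rw [PySem.Dict.getD_foldl_insert_add_one]
    simp
  rw [goBreakA_eq_goBreakB]
  congr 1
  rw [PySem.List.foldl_append_eq_flatMap, List.nil_append]
  have hrw : ∀ f : Int,
      PySem.List.pyRepeat [f]
        (((PySem.Dict.counter arr : PySem.Dict Int Int).values.foldl
          (fun d f => d.insert f (d.getD f 0 + 1))
          (PySem.Dict.empty : PySem.Dict Int Int)).getD f 0)
      = List.replicate ((PySem.Dict.counter arr : PySem.Dict Int Int).values.count f) f := by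
    intro f
    rw [hbucket f, PySem.List.pyRepeat_singleton]
    simp
  calc ((PySem.List.sorted (PySem.Dict.counter arr : PySem.Dict Int Int).items
          (fun kv => kv.2) true).map (·.2))
      = (PySem.List.pyRange (arr.length : Int) 0 (-1)).flatMap
          (fun f => List.replicate ((PySem.Dict.counter arr : PySem.Dict Int Int).values.count f) f) :=
        sorted_counts_eq_desc arr
    _ = _ := by
        apply (List.flatMap_congr ?_).symm
        intro f _
        exact hrw f
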